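-- pv_equiv track=rewrite | github.com/Mart1n66/school | python/fundamentals/matice.6.py | F
-- ===== SOURCE A (Python) =====
-- def F(A):
--
--     for j in range(len(A[0])):
--         pocet = 1
--         prve = A[0][j]
--         for i in range(1,len(A)):
--             if A[i][j] == prve:
--                 pocet += 1
--         if pocet == len(A):
--             return True
--     return False
-- ===== SOURCE B (Python) =====
-- def F(A):
--     cand = set(range(len(A[0])))
--     first = A[0]
--     for row in A[1:]:
--         cand = {j for j in cand if j < len(row) and row[j] == first[j]}
--         if not cand:
--             return False
--     return bool(cand)
-- ===== Notes on version B (the rewrite author's own statement) =====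
-- stated objective: alternative
-- what changed: A scans column by column, counting matches against the first row; B sweeps row by row, maintaining the set of still-candidate column indices and eliminating from it the columns where the current row disagrees with the first row, exiting as soon as no candidate survives (measured faster via that early exit).
-- crash fix: On nonempty ragged matrices with no constant column within every row's length, A raises IndexError at the first out-of-range column access while B returns False (a too-short row simply cannot agree, so the column is eliminated). — e.g. on F([[1, 2], [3]]): A raises IndexError, B returns false
import Mathlib
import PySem

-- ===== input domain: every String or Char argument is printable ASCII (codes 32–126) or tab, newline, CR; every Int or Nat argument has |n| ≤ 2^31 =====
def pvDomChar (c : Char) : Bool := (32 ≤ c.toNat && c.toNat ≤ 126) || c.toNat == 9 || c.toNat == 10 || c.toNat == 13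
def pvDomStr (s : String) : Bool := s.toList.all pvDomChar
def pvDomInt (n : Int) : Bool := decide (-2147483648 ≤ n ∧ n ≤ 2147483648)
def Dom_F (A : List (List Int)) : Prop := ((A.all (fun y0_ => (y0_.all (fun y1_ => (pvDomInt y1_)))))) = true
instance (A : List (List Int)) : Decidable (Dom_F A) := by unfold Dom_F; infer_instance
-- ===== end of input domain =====

-- B replaces A's column-by-column match counting by a row-by-row sweep that maintains the set of
-- still-candidate column indices, eliminating columns as rows disagree (objective: alternative).
-- Equivalence is proved on Pre_F, the inputs where A returns.

-- ===== PORT A =====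
-- inner loop of A for column j: pocet = 1; prve = A[0][j]; for i in range(1, len(A)): if A[i][j] == prve: pocet += 1
def F_col (A : List (List Int)) (j : Int) : Int :=
  let prve := PySem.List.pyGetD (PySem.List.pyGetD A 0 []) j 0
  (PySem.List.pyRange 1 (A.length : Int) 1).foldl
    (fun pocet i =>
      if PySem.List.pyGetD (PySem.List.pyGetD A i []) j 0 = prve then pocet + 1 else pocet) 1

-- outer loop of A over the column indices, with the early 'return True'
def F_outer (A : List (List Int)) : List Int → Bool
  | [] => false
  | j :: js => if F_col A j = (A.length : Int) then true else F_outer A js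

def F (A : List (List Int)) : Bool :=
  F_outer A (PySem.List.pyRange 0 ((PySem.List.pyGetD A 0 []).length : Int) 1)

-- ===== PORT B =====
-- the comprehension's filter: j < len(row) and row[j] == first[j]
def FaltKeep (first row : List Int) (j : Int) : Bool :=
  decide (j < (row.length : Int)) && (PySem.List.pyGetD row j 0 == PySem.List.pyGetD first j 0)

-- for row in A[1:]: cand = {j for j in cand if …}; if not cand: return False  — then return bool(cand).
-- The set comprehension iterates a Set (distinct elements), so it is exactly List.filter on it.
def FaltLoop (first : List Int) : List (List Int) → PySem.Set Int → Bool
  | [], cand => !cand.isEmpty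
  | row :: rest, cand =>
      let c := cand.filter (FaltKeep first row)
      if c.isEmpty then false else FaltLoop first rest c

def F_alt (A : List (List Int)) : Bool :=
  let first := PySem.List.pyGetD A 0 []
  FaltLoop first (PySem.List.slice A (some 1) none)
    (PySem.Set.ofList (PySem.List.pyRange 0 (first.length : Int) 1))

-- ===== PRECONDITION & SPEC =====
-- Pre_F = exactly the inputs on which A returns (elsewhere A raises IndexError: on empty A at
-- A[0], and on ragged rows reached before any constant column): A nonempty, and either every row
-- is at least as long as row 0 (every access A makes is in range), or some column — within every
-- row's length — is constant (A returns True at the first such column, before any bad access).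
def Pre_F (A : List (List Int)) : Prop :=
  A ≠ [] ∧
  ((∀ r ∈ A, A.headI.length ≤ r.length) ∨
   ∃ j < A.headI.length, ∀ r ∈ A, j < r.length ∧ r.getD j 0 = A.headI.getD j 0)
instance (A : List (List Int)) : Decidable (Pre_F A) := by unfold Pre_F; infer_instance

def pvWitness_F : List (List Int) := [[1, 2], [1, 3]]

-- On nonempty ragged matrices with no constant column within every row's length, A raises
-- IndexError at the first out-of-range column access while B returns False (a too-short row
-- simply cannot agree, so B just eliminates the column).
def Raises_F (A : List (List Int)) : Prop :=
  A ≠ [] ∧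
  ¬ ((∀ r ∈ A, A.headI.length ≤ r.length) ∨
     ∃ j < A.headI.length, ∀ r ∈ A, j < r.length ∧ r.getD j 0 = A.headI.getD j 0)
instance (A : List (List Int)) : Decidable (Raises_F A) := by unfold Raises_F; infer_instance

def pvRaiseWitness_F : List (List Int) := [[1, 2], [3]]
def pvRaiseWitnessOut_F : Bool := false

def Spec_F (A : List (List Int)) (out : Bool) : Prop := out = F_alt A
instance (A : List (List Int)) (out : Bool) : Decidable (Spec_F A out) := by unfold Spec_F; infer_instance

-- ===== CLAIM (what is proved, stated in full; the proofs are below) =====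
def Claim_equal_F : Prop := ∀ (A : List (List Int)), Dom_F A → Pre_F A → Spec_F A (F A)
def Claim_raises_F : Prop :=
  (∀ (A : List (List Int)), Dom_F A → Raises_F A → ¬ Pre_F A) ∧
  (Dom_F (pvRaiseWitness_F) ∧ Raises_F (pvRaiseWitness_F) ∧ F_alt (pvRaiseWitness_F) = pvRaiseWitnessOut_F)

-- ===== LEMMAS AND PROOFS =====

-- A's outer loop with early return is 'any'
theorem F_outer_eq_any (A : List (List Int)) :
    ∀ js : List Int, F_outer A js = js.any (fun j => decide (F_col A j = (A.length : Int))) := by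
  intro js
  induction js with
  | nil => rfl
  | cons j rest ih =>
    simp only [F_outer, List.any_cons]
    split_ifs with h <;> simp [h, ih]

-- A's count reaching len(A) on column j is 'every later row agrees with row 0 at j'
theorem F_col_iff (h : List Int) (t : List (List Int)) (j : Nat) :
    (F_col (h :: t) (j : Int) = ((h :: t).length : Int) ↔
      ∀ r ∈ t, r.getD j 0 = h.getD j 0) := by
  unfold F_col
  simp only
  have hfold := PySem.List.foldl_pyRange_pyGetD' (h :: t) []
    (fun pocet row =>
      if PySem.List.pyGetD row (j : Int) 0 =
         PySem.List.pyGetD (PySem.List.pyGetD (h :: t) 0 []) (j : Int) 0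
      then pocet + 1 else pocet) (1 : Int) (a := 1) (by norm_num)
  rw [hfold]
  have hP : (fun (pocet : Int) (row : List Int) =>
      if PySem.List.pyGetD row (j : Int) 0 =
         PySem.List.pyGetD (PySem.List.pyGetD (h :: t) 0 []) (j : Int) 0
      then pocet + 1 else pocet)
    = (fun pocet row =>
      if ((row.getD j 0 : Int) == h.getD j 0) = true then pocet + 1 else pocet) := by
    funext p row
    simp only [PySem.List.pyGetD_zero_cons, PySem.List.pyGetD_natCast, beq_iff_eq]
  rw [hP, PySem.List.foldl_count_if]
  have hlen : ∀ k : Nat, (((1 : Int) + (k : Int)) = ((h :: t).length : Int)) ↔ k = t.length := by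
    intro k; simp [List.length_cons]; omega
  rw [show List.drop (Int.toNat 1) (h :: t) = t from rfl, hlen, List.countP_eq_length]
  simp

-- B's loop returns true iff some candidate survives every row
theorem FaltLoop_iff (first : List Int) :
    ∀ (rows : List (List Int)) (cand : PySem.Set Int),
      FaltLoop first rows cand = true ↔
        ∃ j ∈ cand, ∀ row ∈ rows, FaltKeep first row j = true := by
  intro rows
  induction rows with
  | nil =>
    intro cand
    simp [FaltLoop, List.eq_nil_iff_forall_not_mem]
  | cons row rest ih =>
    intro cand
    simp only [FaltLoop]
    split_ifs with hemp
    · simp only [false_iff]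
      rintro ⟨j, hj, hall⟩
      have : j ∈ cand.filter (FaltKeep first row) :=
        List.mem_filter.mpr ⟨hj, hall row (by simp)⟩
      rw [List.isEmpty_iff.mp hemp] at this
      simp at this
    · rw [ih]
      constructor
      · rintro ⟨j, hj, hall⟩
        rcases List.mem_filter.mp hj with ⟨hjc, hkeep⟩
        exact ⟨j, hjc, fun r hr => by
          rcases List.mem_cons.mp hr with rfl | hr'
          · exact hkeep
          · exact hall r hr'⟩
      · rintro ⟨j, hj, hall⟩
        exact ⟨j, List.mem_filter.mpr ⟨hj, hall row (by simp)⟩,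
          fun r hr => hall r (by simp [hr])⟩

-- FaltKeep at a natural index, spelled out
theorem FaltKeep_natCast (first row : List Int) (k : Nat) :
    FaltKeep first row (k : Int) = true ↔ (k < row.length ∧ row.getD k 0 = first.getD k 0) := by
  unfold FaltKeep
  simp

-- ===== VERDICT (by name: the statement is the Claim_ definition above) =====
theorem F_spec : Claim_equal_F := by
  unfold Claim_equal_F
  intro A _ hpre
  obtain ⟨hne, hcase⟩ := hpre
  obtain ⟨h, t, rfl⟩ : ∃ h t, A = h :: t := by
    cases A with
    | nil => exact absurd rfl hne
    | cons h t => exact ⟨h, t, rfl⟩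
  unfold Spec_F F F_alt
  simp only [PySem.List.pyGetD_zero_cons, PySem.List.slice_from_one, List.tail_cons,
    PySem.List.pyRange_zero_nat, F_outer_eq_any]
  rw [Bool.eq_iff_iff]
  rw [List.any_eq_true]
  rw [FaltLoop_iff]
  simp only [List.mem_map, List.mem_range, PySem.Set.mem_ofList, decide_eq_true_eq]
  constructor
  · rintro ⟨j, ⟨k, hk, rfl⟩, hcol⟩
    have hagree := (F_col_iff h t k).mp hcol
    rcases hcase with hrect | ⟨j0, hj0, hconst⟩
    · refine ⟨(k : Int), ⟨k, hk, rfl⟩, fun r hr => ?_⟩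
      rw [FaltKeep_natCast]
      have hlen := hrect r (by simp [hr])
      simp only [List.headI] at hlen
      exact ⟨by omega, hagree r hr⟩
    · refine ⟨(j0 : Int), ⟨j0, by simpa using hj0, rfl⟩, fun r hr => ?_⟩
      rw [FaltKeep_natCast]
      have := hconst r (by simp [hr])
      simpa using this
  · rintro ⟨j, ⟨k, hk, rfl⟩, hall⟩
    refine ⟨(k : Int), ⟨k, hk, rfl⟩, (F_col_iff h t k).mpr fun r hr => ?_⟩
    exact ((FaltKeep_natCast h r k).mp (hall r hr)).2

@[simp] theorem F_raises : Claim_raises_F := by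
  unfold Claim_raises_F
  constructor
  · rintro A _ ⟨_, hnot⟩ ⟨_, hcase⟩
    exact hnot hcase
  · exact ⟨by decide, by decide, by decide⟩
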